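-- pv_equiv track=rewrite | github.com/medvinski/biopharma-trends | scripts/pharma_scraper.py | filter_unwanted
-- ===== SOURCE A (Python) =====
-- def filter_unwanted(text):
--     """
--     Funkcja usuwa niechciane linie tekstu.
--     Przerywa dalsze przetwarzanie, gdy natrafi na frazy takie jak "apply now" lub "jobs by experience".
--     """
--     lines = text.splitlines()  # Podział tekstu na poszczególne linie.
--     filtered = []
--     for line in lines:
--         low_line = line.strip().lower()  # Normalizacja – usunięcie zbędnych spacji i zamiana na małe litery.
--         # Jeśli linia zawiera "apply now" lub "jobs by experience", przerywamy dalsze przetwarzanie.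
--         if "apply now" in low_line:
--             break
--         if "jobs by experience" in low_line:
--             break
--         filtered.append(line.strip())
--     return "\n".join(filtered)
-- ===== SOURCE B (Python) =====
-- def filter_unwanted(text):
--     # Stage 1: strip every line up front.
--     lines = [line.strip() for line in text.splitlines()]
--     # Stage 2: cumulative prefix-OR flag: has a break phrase occurred at or before this line?
--     flags = []
--     seen = False
--     for line in lines:
--         low = line.lower()
--         seen = seen or ("apply now" in low) or ("jobs by experience" in low)
--         flags.append(seen)
--     # Stage 3: keep exactly the lines whose cumulative flag is still False.
--     return "\n".join(line for line, f in zip(lines, flags) if not f)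
-- ===== Notes on version B (the rewrite author's own statement) =====
-- stated objective: alternative
-- what changed: B has no break or cut: it strips all lines first, then a second pass computes a cumulative prefix-OR flag marking whether a break phrase has occurred at or before each line, and a final pass filters by that flag and joins, instead of A's single interleaved accumulate-and-break loop.
import Mathlib
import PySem

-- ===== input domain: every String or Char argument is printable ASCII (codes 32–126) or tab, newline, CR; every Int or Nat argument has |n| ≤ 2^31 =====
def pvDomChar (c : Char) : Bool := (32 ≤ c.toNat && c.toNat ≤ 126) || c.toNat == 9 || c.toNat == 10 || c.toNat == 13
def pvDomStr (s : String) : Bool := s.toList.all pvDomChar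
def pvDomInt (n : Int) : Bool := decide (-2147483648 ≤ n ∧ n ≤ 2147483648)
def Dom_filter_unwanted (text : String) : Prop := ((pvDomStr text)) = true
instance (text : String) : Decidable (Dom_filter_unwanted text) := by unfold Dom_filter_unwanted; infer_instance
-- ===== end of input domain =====

-- B replaces A's accumulate-and-break loop by three stages: strip all lines, a prefix-OR flag scan, and a filter by flag (alternative decomposition, same cost).

-- ===== PORT A =====
-- the for-loop with break, as structural recursion over the lines
def pvLoopA : List String → List String
  | [] => []
  | l :: rest =>
    let low := PySem.Str.lower (PySem.Str.strip l)
    if PySem.Str.isIn "apply now" low then []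
    else if PySem.Str.isIn "jobs by experience" low then []
    else PySem.Str.strip l :: pvLoopA rest

def filter_unwanted (text : String) : String :=
  PySem.Str.join "\n" (pvLoopA (PySem.Str.splitlines text))

-- ===== PORT B =====
-- the flag-building loop of Source B: state is (seen, flags), flags appended in order
def pvFlagsB (lines : List String) : List Bool :=
  (lines.foldl (fun (st : Bool × List Bool) line =>
      let low := PySem.Str.lower line
      let seen := st.1 || PySem.Str.isIn "apply now" low || PySem.Str.isIn "jobs by experience" low
      (seen, st.2 ++ [seen])) (false, [])).2

def filter_unwanted_alt (text : String) : String :=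
  let lines := (PySem.Str.splitlines text).map PySem.Str.strip
  let flags := pvFlagsB lines
  PySem.Str.join "\n" ((lines.zip flags).filterMap (fun p => if p.2 then none else some p.1))

-- ===== PRECONDITION & SPEC =====
def Spec_filter_unwanted (text : String) (out : String) : Prop := out = filter_unwanted_alt text
instance (text : String) (out : String) : Decidable (Spec_filter_unwanted text out) := by unfold Spec_filter_unwanted; infer_instance

-- ===== CLAIM (what is proved, stated in full; the proofs are below) =====
def Claim_equal_filter_unwanted : Prop := ∀ (text : String), Dom_filter_unwanted text → Spec_filter_unwanted text (filter_unwanted text)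

-- ===== LEMMAS AND PROOFS =====

-- the per-line predicate of Source B, on an already-stripped line
def pvPred (l : String) : Bool :=
  PySem.Str.isIn "apply now" (PySem.Str.lower l) || PySem.Str.isIn "jobs by experience" (PySem.Str.lower l)

-- functional characterisation of the flag scan
def pvScanOr : Bool → List String → List Bool
  | _, [] => []
  | a, l :: ls => (a || pvPred l) :: pvScanOr (a || pvPred l) ls

theorem pvFlagsB_foldl (lines : List String) (a : Bool) (out : List Bool) :
    lines.foldl (fun (st : Bool × List Bool) line =>
      let low := PySem.Str.lower line
      let seen := st.1 || PySem.Str.isIn "apply now" low || PySem.Str.isIn "jobs by experience" low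
      (seen, st.2 ++ [seen])) (a, out)
    = ((a || lines.any pvPred), out ++ pvScanOr a lines) := by
  induction lines generalizing a out with
  | nil => simp [pvScanOr]
  | cons l ls ih =>
    simp only [List.foldl_cons]
    rw [ih]
    simp only [pvScanOr, pvPred, List.any_cons, List.append_assoc, List.singleton_append]
    cases PySem.Str.isIn "apply now" (PySem.Str.lower l) <;>
      cases PySem.Str.isIn "jobs by experience" (PySem.Str.lower l) <;> simp

-- the filter stage of Source B
def pvFzip (ls : List String) (fs : List Bool) : List String :=
  (ls.zip fs).filterMap (fun p => if p.2 then none else some p.1)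

theorem pvFzip_true (ls : List String) : pvFzip ls (pvScanOr true ls) = [] := by
  induction ls with
  | nil => rfl
  | cons l rest ih => simpa [pvFzip, pvScanOr, List.filterMap] using ih

theorem pvLoopA_eq (ls : List String) :
    pvLoopA ls = pvFzip (ls.map PySem.Str.strip) (pvScanOr false (ls.map PySem.Str.strip)) := by
  induction ls with
  | nil => rfl
  | cons l rest ih =>
    simp only [pvLoopA, List.map_cons, pvScanOr, Bool.false_or, pvPred]
    cases h1 : PySem.Str.isIn "apply now" (PySem.Str.lower (PySem.Str.strip l)) with
    | true => simpa [h1, pvFzip] using pvFzip_true (rest.map PySem.Str.strip)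
    | false =>
      cases h2 : PySem.Str.isIn "jobs by experience" (PySem.Str.lower (PySem.Str.strip l)) with
      | true => simpa [h1, h2, pvFzip] using pvFzip_true (rest.map PySem.Str.strip)
      | false => simp [pvFzip] at ih ⊢; exact ih

-- ===== VERDICT (by name: the statement is the Claim_ definition above) =====
theorem filter_unwanted_spec : Claim_equal_filter_unwanted := by
  intro text _
  unfold Spec_filter_unwanted filter_unwanted filter_unwanted_alt
  rw [pvLoopA_eq]
  simp only [pvFlagsB, pvFlagsB_foldl, List.nil_append, pvFzip]
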